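-- pv_equiv track=rewrite | github.com/abcdw/inno | DM/HW8/calc.py | func
-- ===== SOURCE A (Python) =====
-- def func(n, m):
--     count = 0
--     prod = 1
--     for i in range(1, n + 1):
--         prod = i
--         dv = divmod(prod, m)
--         while dv[1] == 0:
--             count += 1
--             prod = dv[0]
--             dv = divmod(prod, m)
--
--     return count
-- ===== SOURCE B (Python) =====
-- def func(n, m):
--     # Legendre-style count: sum of floor(n / p^k) over k >= 1, p = |m|.
--     if n <= 0:
--         return 0
--     p = abs(m)
--     total = 0
--     pw = p
--     while pw <= n:
--         total += n // pw
--         pw *= p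
--     return total
-- ===== Notes on version B (the rewrite author's own statement) =====
-- stated objective: faster
-- what changed: Instead of dividing every integer 1..n by m repeatedly, B sums floor(n/|m|^k) over the powers |m|^k <= n (Legendre's formula), replacing the O(n log n) double loop by a single O(log n) loop over powers.
import Mathlib
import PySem

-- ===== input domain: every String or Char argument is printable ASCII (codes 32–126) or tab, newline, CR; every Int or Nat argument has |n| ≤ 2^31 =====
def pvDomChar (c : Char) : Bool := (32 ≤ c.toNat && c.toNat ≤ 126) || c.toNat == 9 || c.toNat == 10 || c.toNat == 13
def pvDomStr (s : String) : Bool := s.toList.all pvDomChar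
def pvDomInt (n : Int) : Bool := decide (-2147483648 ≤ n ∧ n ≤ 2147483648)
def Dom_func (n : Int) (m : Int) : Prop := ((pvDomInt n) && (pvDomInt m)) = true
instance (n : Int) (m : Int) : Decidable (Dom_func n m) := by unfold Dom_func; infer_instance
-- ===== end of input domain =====

-- B replaces A's per-integer repeated division by Legendre's formula:
-- the sum of n // |m|^k over the powers |m|^k <= n.

-- ===== PORT A =====
-- inner 'while dv[1] == 0' loop of A; fuel is only a totality guard (on inputs
-- admitted by Pre_func the loop runs fewer than prod.natAbs + 1 times).
def innerA (m : Int) : Nat → Int → Int → Int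
  | 0, count, _ => count
  | fuel + 1, count, prod =>
    match PySem.Int.divmod? prod m with
    | none => count          -- m = 0: Python raises ZeroDivisionError (outside Pre_func)
    | some dv => if dv.2 = 0 then innerA m fuel (count + 1) dv.1 else count

def func (n : Int) (m : Int) : Int :=
  (PySem.List.pyRange 1 (n + 1) 1).foldl (fun count i => innerA m (i.natAbs + 1) count i) 0

-- ===== PORT B =====
-- 'while pw <= n' loop of B; fuel is only a totality guard (on inputs admitted
-- by Pre_func pw at least doubles each step, so n.natAbs + 1 steps suffice).
def bloop (n p : Int) : Nat → Int → Int → Int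
  | 0, _, total => total
  | fuel + 1, pw, total =>
    if pw ≤ n then bloop n p fuel (pw * p) (total + PySem.Int.floordiv n pw) else total

def func_alt (n : Int) (m : Int) : Int :=
  if n ≤ 0 then 0
  else bloop n (m.natAbs : Int) (n.natAbs + 1) (m.natAbs : Int) 0

-- ===== PRECONDITION & SPEC =====
-- Pre_func excludes exactly m ∈ {-1, 0, 1} with n ≥ 1: there A never returns
-- (ZeroDivisionError for m = 0, an infinite loop for m = ±1).
def Pre_func (n : Int) (m : Int) : Prop := 1 ≤ n → (m ≤ -2 ∨ 2 ≤ m)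
instance (n : Int) (m : Int) : Decidable (Pre_func n m) := by unfold Pre_func; infer_instance
def pvWitness_func : Int × Int := (10, 2)

def Spec_func (n : Int) (m : Int) (out : Int) : Prop := out = func_alt n m
instance (n : Int) (m : Int) (out : Int) : Decidable (Spec_func n m out) := by unfold Spec_func; infer_instance

-- ===== CLAIM (what is proved, stated in full; the proofs are below) =====
def Claim_equal_func : Prop := ∀ (n : Int) (m : Int), Dom_func n m → Pre_func n m → Spec_func n m (func n m)

-- ===== LEMMAS AND PROOFS =====

-- multiplicity of p in x (number of exact divisions by p)
def pval (p x : Nat) : Nat :=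
  if h : 2 ≤ p ∧ 0 < x ∧ p ∣ x then pval p (x / p) + 1 else 0
termination_by x
decreasing_by exact Nat.div_lt_self h.2.1 (by omega)

-- sum of N / pw' over the powers pw' = pw, pw*p, pw*p², … with pw' ≤ N
def legAux (N p pw : Nat) : Nat :=
  if h : 2 ≤ p ∧ 1 ≤ pw ∧ pw ≤ N then N / pw + legAux N p (pw * p) else 0
termination_by N + 1 - pw
decreasing_by have := Nat.mul_le_mul_left pw h.1; omega

-- number of powers pw' = pw, pw*p, pw*p², … with pw' ≤ a that divide a
def cntDvd (a p pw : Nat) : Nat :=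
  if h : 2 ≤ p ∧ 1 ≤ pw ∧ pw ≤ a then (if pw ∣ a then 1 else 0) + cntDvd a p (pw * p) else 0
termination_by a + 1 - pw
decreasing_by have := Nat.mul_le_mul_left pw h.1; omega

lemma legAux_pos (N p pw : Nat) (h : 2 ≤ p ∧ 1 ≤ pw ∧ pw ≤ N) :
    legAux N p pw = N / pw + legAux N p (pw * p) := by rw [legAux, dif_pos h]

lemma legAux_nil (N p pw : Nat) (h : ¬ pw ≤ N) : legAux N p pw = 0 := by
  rw [legAux, dif_neg (by tauto)]

lemma cntDvd_pos (a p pw : Nat) (h : 2 ≤ p ∧ 1 ≤ pw ∧ pw ≤ a) :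
    cntDvd a p pw = (if pw ∣ a then 1 else 0) + cntDvd a p (pw * p) := by
  rw [cntDvd, dif_pos h]

lemma pval_pos (p x : Nat) (h : 2 ≤ p ∧ 0 < x ∧ p ∣ x) :
    pval p x = pval p (x / p) + 1 := by rw [pval]; rw [dif_pos h]

lemma pval_nil (p x : Nat) (h : ¬ p ∣ x) : pval p x = 0 := by
  rw [pval, dif_neg (by tauto)]

lemma pval_le (p x : Nat) : pval p x ≤ x := by
  induction x using Nat.strong_induction_on with
  | _ x ih =>
    rw [pval]
    split
    · rename_i h
      have hlt : x / p < x := Nat.div_lt_self h.2.1 (by omega)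
      have := ih _ hlt
      omega
    · omega

-- A's inner while loop computes the multiplicity of m in prod
lemma innerA_eq (m : Int) (hp : 2 ≤ m.natAbs) :
    ∀ (fuel : Nat) (prod count : Int), prod ≠ 0 → pval m.natAbs prod.natAbs < fuel →
      innerA m fuel count prod = count + (pval m.natAbs prod.natAbs : Int) := by
  intro fuel
  induction fuel with
  | zero => intro prod count _ h; omega
  | succ fuel ih =>
    intro prod count hprod hlt
    have hm : m ≠ 0 := by intro e; rw [e] at hp; simp at hp
    have hdvd := PySem.Int.mod_eq_zero_iff_dvd prod m
    simp only [PySem.Int.mod] at hdvd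
    simp only [innerA, PySem.Int.divmod?, if_neg hm]
    by_cases hr : prod.fmod m = 0
    · have hmd : m ∣ prod := hdvd.mp hr
      have hq : prod.fdiv m * m = prod := by
        have := PySem.Int.floordiv_mul_add_mod prod m
        simp only [PySem.Int.floordiv, PySem.Int.mod] at this
        omega
      set q := prod.fdiv m with hqdef
      have hq0 : q ≠ 0 := by
        intro e; rw [e] at hq; simp at hq; exact hprod hq.symm
      have habs : q.natAbs * m.natAbs = prod.natAbs := by
        rw [← Int.natAbs_mul, hq]
      have hqabs : prod.natAbs / m.natAbs = q.natAbs := by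
        rw [← habs, Nat.mul_div_cancel _ (by omega)]
      have hpd : m.natAbs ∣ prod.natAbs := Int.natAbs_dvd_natAbs.mpr hmd
      have hstep : pval m.natAbs prod.natAbs = pval m.natAbs q.natAbs + 1 := by
        rw [pval_pos m.natAbs prod.natAbs ⟨hp, by omega, hpd⟩, hqabs]
      rw [if_pos hr, ih q (count + 1) hq0 (by omega)]
      push_cast [hstep]; ring
    · rw [if_neg hr]
      have hnd : ¬ m ∣ prod := fun h => hr (hdvd.mpr h)
      have h0 : pval m.natAbs prod.natAbs = 0 := by
        rw [pval_nil]
        intro h; exact hnd (Int.natAbs_dvd_natAbs.mp h)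
      rw [h0]; simp

lemma cntDvd_zero (a p : Nat) : ∀ k pw, a + 1 - pw ≤ k → ¬ pw ∣ a → cntDvd a p pw = 0 := by
  intro k
  induction k with
  | zero =>
    intro pw hk hnd
    rw [cntDvd, dif_neg]; rintro ⟨h1, h2, h3⟩; omega
  | succ k ih =>
    intro pw hk hnd
    by_cases hg : 2 ≤ p ∧ 1 ≤ pw ∧ pw ≤ a
    · have hmul := Nat.mul_le_mul_left pw hg.1
      rw [cntDvd_pos a p pw hg, if_neg hnd,
        ih (pw * p) (by omega) (fun hd => hnd (dvd_trans (Dvd.intro p rfl) hd))]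
    · rw [cntDvd, dif_neg hg]

lemma cntDvd_mul (p : Nat) (hp : 2 ≤ p) :
    ∀ (y : Nat), ∀ pw, 1 ≤ y → 1 ≤ pw → cntDvd (pw * y) p pw = 1 + pval p y := by
  intro y
  induction y using Nat.strong_induction_on with
  | _ y ih =>
    intro pw hy hpw
    rw [cntDvd_pos _ _ _ ⟨hp, hpw, Nat.le_mul_of_pos_right _ (by omega)⟩,
      if_pos (dvd_mul_right pw y)]
    by_cases hd : p ∣ y
    · obtain ⟨y', rfl⟩ := hd
      have hy' : 1 ≤ y' := Nat.pos_of_ne_zero (by rintro rfl; simp at hy)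
      have hy'lt : y' < p * y' := by have := Nat.mul_le_mul_right y' hp; omega
      have harr : pw * (p * y') = (pw * p) * y' := by ring
      have hpp : 1 ≤ pw * p := by
        have := Nat.mul_pos (show 0 < pw by omega) (show 0 < p by omega); omega
      rw [harr, ih y' hy'lt (pw * p) hy' hpp,
        pval_pos p (p * y') ⟨hp, by omega, dvd_mul_right p y'⟩,
        Nat.mul_div_cancel_left _ (by omega)]
      omega
    · have hnd : ¬ pw * p ∣ pw * y := by
        intro h
        exact hd ((Nat.mul_dvd_mul_iff_left (by omega : 0 < pw)).mp h)
      rw [cntDvd_zero (pw * y) p (pw * y + 1) (pw * p) (by omega) hnd,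
        pval_nil p y hd]

-- the powers of p dividing x, counted from pw = p, are exactly the multiplicity
lemma cntDvd_eq_pval (p x : Nat) (hp : 2 ≤ p) (hx : 1 ≤ x) : cntDvd x p p = pval p x := by
  by_cases hd : p ∣ x
  · obtain ⟨y, rfl⟩ := hd
    have hy : 1 ≤ y := Nat.pos_of_ne_zero (by rintro rfl; simp at hx)
    rw [cntDvd_mul p hp y p hy (by omega),
      pval_pos p (p * y) ⟨hp, by omega, dvd_mul_right p y⟩,
      Nat.mul_div_cancel_left _ (by omega)]
    omega
  · rw [cntDvd_zero x p (x + 1) p (by omega) hd, pval_nil p x hd]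

-- stepping N to N+1 adds one per power of p dividing N+1
lemma legAux_succ (N p : Nat) (hp : 2 ≤ p) :
    ∀ k pw, N + 2 - pw ≤ k → 1 ≤ pw →
      legAux (N + 1) p pw = legAux N p pw + cntDvd (N + 1) p pw := by
  intro k
  induction k with
  | zero =>
    intro pw hk hpw
    rw [legAux_nil (N + 1) p pw (by omega), legAux_nil N p pw (by omega),
      cntDvd, dif_neg (by rintro ⟨_, _, _⟩; omega)]
  | succ k ih =>
    intro pw hk hpw
    have hgrow : pw < pw * p := by have := Nat.mul_le_mul_left pw hp; omega
    have hpp : 1 ≤ pw * p := by omega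
    rcases Nat.lt_or_ge N pw with hNpw | hNpw
    · rw [legAux_nil N p pw (by omega)]
      rcases Nat.lt_or_ge (N + 1) pw with h1 | h1
      · rw [legAux_nil (N + 1) p pw (by omega),
          cntDvd, dif_neg (by rintro ⟨_, _, _⟩; omega)]
      · -- pw = N + 1
        have hpwN : pw = N + 1 := by omega
        have hnd : ¬ pw * p ∣ N + 1 := fun hd => by
          have := Nat.le_of_dvd (by omega) hd; omega
        rw [legAux_pos (N + 1) p pw ⟨hp, hpw, by omega⟩,
          cntDvd_pos (N + 1) p pw ⟨hp, hpw, by omega⟩,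
          legAux_nil (N + 1) p (pw * p) (by omega),
          cntDvd_zero (N + 1) p (N + 2) (pw * p) (by omega) hnd,
          hpwN, Nat.div_self (by omega), if_pos dvd_rfl]
    · rw [legAux_pos (N + 1) p pw ⟨hp, hpw, by omega⟩,
        ih (pw * p) (by omega) hpp,
        legAux_pos N p pw ⟨hp, hpw, hNpw⟩,
        cntDvd_pos (N + 1) p pw ⟨hp, hpw, by omega⟩,
        Nat.succ_div]
      omega

-- Legendre's identity: Σ_{i=1}^{N} v_p(i) = Σ_{k ≥ 1, p^k ≤ N} N / p^k
lemma legAux_eq_sum (p : Nat) (hp : 2 ≤ p) (N : Nat) :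
    legAux N p p = ((List.range N).map (fun i => pval p (i + 1))).sum := by
  induction N with
  | zero => rw [legAux_nil 0 p p (by omega)]; rfl
  | succ N ih =>
    rw [legAux_succ N p hp (N + 2) p (by omega) (by omega),
      cntDvd_eq_pval p (N + 1) hp (by omega), ih, List.range_succ]
    simp

-- B's while loop computes legAux
lemma bloop_eq (n : Int) (p : Nat) (hp : 2 ≤ p) (hn : 0 < n) :
    ∀ (fuel : Nat) (pw : Nat) (total : Int), 1 ≤ pw → n.toNat < pw * 2 ^ fuel →
      bloop n (p : Int) fuel (pw : Int) total = total + (legAux n.toNat p pw : Int) := by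
  intro fuel
  induction fuel with
  | zero =>
    intro pw total hpw hlt
    simp only [pow_zero, Nat.mul_one] at hlt
    rw [bloop, legAux_nil n.toNat p pw (by omega)]
    simp
  | succ fuel ih =>
    intro pw total hpw hlt
    have hcast : ((n.toNat : Int)) = n := Int.toNat_of_nonneg (by omega)
    simp only [bloop]
    by_cases hle : (pw : Int) ≤ n
    · have hpwN : pw ≤ n.toNat := by omega
      rw [if_pos hle]
      have hc : (pw : Int) * (p : Int) = ((pw * p : Nat) : Int) := by push_cast; ring
      have hmeas : n.toNat < pw * p * 2 ^ fuel := by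
        have h1 : pw * 2 ^ (fuel + 1) = (pw * 2) * 2 ^ fuel := by ring
        have h2 : pw * 2 ≤ pw * p := Nat.mul_le_mul_left pw hp
        have h3 : (pw * 2) * 2 ^ fuel ≤ (pw * p) * 2 ^ fuel :=
          Nat.mul_le_mul_right _ h2
        omega
      have hdiv : PySem.Int.floordiv n (pw : Int) = ((n.toNat / pw : Nat) : Int) := by
        rw [← hcast, PySem.Int.floordiv_natCast]; simp
      rw [hc, ih (pw * p) (total + PySem.Int.floordiv n (pw : Int))
            (by have := Nat.mul_pos (show 0 < pw by omega) (show 0 < p by omega); omega) hmeas,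
        hdiv, legAux_pos n.toNat p pw ⟨hp, hpw, hpwN⟩]
      push_cast; ring
    · rw [if_neg hle, legAux_nil n.toNat p pw (by omega)]
      simp

-- A's double loop computes the sum of the multiplicities of 1..n
lemma func_eq_sum (n m : Int) (hn : 1 ≤ n) (hp : 2 ≤ m.natAbs) :
    func n m = (((List.range n.toNat).map (fun i => pval m.natAbs (i + 1))).sum : Int) := by
  unfold func
  rw [PySem.List.pyRange_one 1 (n + 1)]
  have hN : (n + 1 - 1).toNat = n.toNat := by omega
  rw [hN, List.foldl_map]
  rw [PySem.List.foldl_congr_mem (List.range n.toNat)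
    (fun count k => innerA m ((1 + (k : Int)).natAbs + 1) count (1 + (k : Int)))
    (fun count k => count + (pval m.natAbs (k + 1) : Int)) 0 ?_]
  · rw [PySem.List.foldl_add]
    simp [Function.comp_def]
  · intro acc k _
    simp only
    have habs : (1 + (k : Int)).natAbs = k + 1 := by omega
    rw [innerA_eq m hp ((1 + (k : Int)).natAbs + 1) (1 + (k : Int)) acc (by omega)
      (by rw [habs]; have := pval_le m.natAbs (k + 1); omega), habs]

-- ===== VERDICT (by name: the statement is the Claim_ definition above) =====
theorem func_spec : Claim_equal_func := by
  intro n m _ hpre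
  unfold Spec_func func_alt
  by_cases hn : n ≤ 0
  · simp only [if_pos hn, func]
    rw [PySem.List.pyRange_one_eq_nil (by omega)]
    rfl
  · have hn1 : 1 ≤ n := by omega
    have hp : 2 ≤ m.natAbs := by
      rcases hpre hn1 with h | h <;> omega
    rw [if_neg hn, func_eq_sum n m hn1 hp, ← legAux_eq_sum m.natAbs hp n.toNat]
    have hfuel : n.toNat < m.natAbs * 2 ^ (n.natAbs + 1) := by
      have h1 : n.toNat < 2 ^ n.toNat := Nat.lt_two_pow_self
      have h2 : (2 : Nat) ^ n.toNat ≤ 2 ^ (n.natAbs + 1) :=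
        Nat.pow_le_pow_right (by omega) (by omega)
      calc n.toNat < 2 ^ (n.natAbs + 1) := lt_of_lt_of_le h1 h2
        _ ≤ m.natAbs * 2 ^ (n.natAbs + 1) := Nat.le_mul_of_pos_left _ (by omega)
    rw [bloop_eq n m.natAbs hp (by omega) (n.natAbs + 1) m.natAbs 0 (by omega) hfuel]
    simp
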